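-- pv_equiv track=rewrite | github.com/drovi-co/drovi | drovi-intelligence/src/auth/scopes.py | has_scope
-- ===== SOURCE A (Python) =====
-- from enum import Enum
--
-- class Scope(str, Enum):
--     """API permission scopes."""
--
--     # Read scopes
--     READ = "read"  # Read UIOs, search, view contacts
--     READ_GRAPH = "read:graph"  # Read graph data
--     READ_ANALYTICS = "read:analytics"  # Read analytics data
--
--     # Write scopes
--     WRITE = "write"  # Create/update UIOs, analyze content
--     WRITE_GRAPH = "write:graph"  # Modify graph data
--     WRITE_CONNECTIONS = "write:connections"  # Manage connections
--
--     # Admin scopes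
--     ADMIN = "admin"  # Full access
--     MANAGE_KEYS = "manage:keys"  # Create/revoke API keys
--
--     # Special scopes
--     INTERNAL = "internal"  # Internal Drovi app (all access)
--     MCP = "mcp"  # MCP tool access
--
-- SCOPE_HIERARCHY = {
--     Scope.ADMIN: [
--         Scope.READ,
--         Scope.READ_GRAPH,
--         Scope.READ_ANALYTICS,
--         Scope.WRITE,
--         Scope.WRITE_GRAPH,
--         Scope.WRITE_CONNECTIONS,
--         Scope.MANAGE_KEYS,
--         Scope.MCP,
--     ],
--     Scope.INTERNAL: [
--         Scope.READ,
--         Scope.READ_GRAPH,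
--         Scope.READ_ANALYTICS,
--         Scope.WRITE,
--         Scope.WRITE_GRAPH,
--         Scope.WRITE_CONNECTIONS,
--         Scope.MANAGE_KEYS,
--         Scope.MCP,
--         Scope.ADMIN,
--     ],
--     Scope.WRITE: [Scope.READ],
--     Scope.WRITE_GRAPH: [Scope.READ_GRAPH],
--     Scope.WRITE_CONNECTIONS: [Scope.READ],
-- }
--
-- def has_scope(granted_scopes: list[str], required_scope: str) -> bool:
--     """
--     Check if granted scopes include the required scope.
--
--     Handles scope hierarchy - e.g., ADMIN includes all scopes.
--
--     Args:
--         granted_scopes: List of granted scope strings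
--         required_scope: Required scope string
--
--     Returns:
--         True if scope is granted
--     """
--     # Wildcard grants all
--     if "*" in granted_scopes:
--         return True
--
--     # Direct match
--     if required_scope in granted_scopes:
--         return True
--
--     # Check hierarchy
--     for granted in granted_scopes:
--         try:
--             granted_enum = Scope(granted)
--             if granted_enum in SCOPE_HIERARCHY:
--                 implied = SCOPE_HIERARCHY[granted_enum]
--                 if required_scope in [s.value for s in implied]:
--                     return True
--         except ValueError:
--             continue
--
--     return False
-- ===== SOURCE B (Python) =====
-- from enum import Enum
--
-- class Scope(str, Enum):
--     READ = "read"
--     READ_GRAPH = "read:graph"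
--     READ_ANALYTICS = "read:analytics"
--     WRITE = "write"
--     WRITE_GRAPH = "write:graph"
--     WRITE_CONNECTIONS = "write:connections"
--     ADMIN = "admin"
--     MANAGE_KEYS = "manage:keys"
--     INTERNAL = "internal"
--     MCP = "mcp"
--
-- SCOPE_HIERARCHY = {
--     Scope.ADMIN: [Scope.READ, Scope.READ_GRAPH, Scope.READ_ANALYTICS, Scope.WRITE,
--                   Scope.WRITE_GRAPH, Scope.WRITE_CONNECTIONS, Scope.MANAGE_KEYS, Scope.MCP],
--     Scope.INTERNAL: [Scope.READ, Scope.READ_GRAPH, Scope.READ_ANALYTICS, Scope.WRITE,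
--                      Scope.WRITE_GRAPH, Scope.WRITE_CONNECTIONS, Scope.MANAGE_KEYS,
--                      Scope.MCP, Scope.ADMIN],
--     Scope.WRITE: [Scope.READ],
--     Scope.WRITE_GRAPH: [Scope.READ_GRAPH],
--     Scope.WRITE_CONNECTIONS: [Scope.READ],
-- }
--
-- # Reverse index, built once: scope string -> the scope strings that imply it.
-- GRANTERS: dict[str, set[str]] = {}
-- for _key, _implied in SCOPE_HIERARCHY.items():
--     for _s in _implied:
--         GRANTERS.setdefault(_s.value, set()).add(_key.value)
--
-- def has_scope(granted_scopes: list[str], required_scope: str) -> bool: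
--     # Reverse direction: compute which strings would satisfy the requirement,
--     # then scan the granted list once for any of them.
--     satisfiers = {"*", required_scope} | GRANTERS.get(required_scope, set())
--     return any(g in satisfiers for g in granted_scopes)
-- ===== Notes on version B (the rewrite author's own statement) =====
-- stated objective: faster
-- what changed: A expands each granted scope forward through SCOPE_HIERARCHY inside the loop (enum construction plus list scan per element); B precomputes the reverse index (scope -> scopes that imply it) once, forms the satisfier set {'*', required} | GRANTERS[required] from the required scope alone, and does a single membership scan of the granted list.
import Mathlib
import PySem

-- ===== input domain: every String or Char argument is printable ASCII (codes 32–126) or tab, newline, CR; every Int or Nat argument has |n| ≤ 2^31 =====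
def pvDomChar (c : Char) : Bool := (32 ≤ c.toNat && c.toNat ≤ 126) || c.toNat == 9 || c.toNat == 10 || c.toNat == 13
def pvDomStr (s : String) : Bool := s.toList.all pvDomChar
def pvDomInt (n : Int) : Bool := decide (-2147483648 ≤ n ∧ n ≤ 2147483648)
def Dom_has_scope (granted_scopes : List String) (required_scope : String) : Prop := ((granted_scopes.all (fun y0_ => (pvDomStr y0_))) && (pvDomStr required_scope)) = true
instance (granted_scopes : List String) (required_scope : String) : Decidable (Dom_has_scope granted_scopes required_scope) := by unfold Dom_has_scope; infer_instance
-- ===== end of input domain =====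

-- B reverses the direction: instead of A's forward expansion of each granted scope, it looks the
-- required scope up in a precomputed reverse index and scans the granted list once (objective: alternative).

-- SCOPE_HIERARCHY lookup after Scope(granted): 'some implied-values' exactly when granted is a
-- valid Scope value that is a key of SCOPE_HIERARCHY; 'none' both on ValueError and on a valid
-- scope that is not a key (A treats both identically: continue).
def scopeImplied? (g : String) : Option (List String) :=
  if g = "admin" then
    some ["read", "read:graph", "read:analytics", "write", "write:graph", "write:connections", "manage:keys", "mcp"]
  else if g = "internal" then
    some ["read", "read:graph", "read:analytics", "write", "write:graph", "write:connections", "manage:keys", "mcp", "admin"]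
  else if g = "write" then some ["read"]
  else if g = "write:graph" then some ["read:graph"]
  else if g = "write:connections" then some ["read"]
  else none

-- ===== PORT A =====
-- A's hierarchy loop: first granted whose implied list contains required_scope returns True.
def hasScopeLoopA (granted : List String) (required_scope : String) : Bool :=
  match granted with
  | [] => false
  | g :: rest =>
    match scopeImplied? g with
    | some implied => if implied.contains required_scope then true else hasScopeLoopA rest required_scope
    | none => hasScopeLoopA rest required_scope

def has_scope (granted_scopes : List String) (required_scope : String) : Bool :=
  if granted_scopes.contains "*" then true
  else if granted_scopes.contains required_scope then true
  else hasScopeLoopA granted_scopes required_scope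

-- ===== PORT B =====
-- SCOPE_HIERARCHY as (key.value, [s.value for s in implied]) pairs, insertion order.
def hierarchyPairs : List (String × List String) :=
  [("admin", ["read", "read:graph", "read:analytics", "write", "write:graph", "write:connections", "manage:keys", "mcp"]),
   ("internal", ["read", "read:graph", "read:analytics", "write", "write:graph", "write:connections", "manage:keys", "mcp", "admin"]),
   ("write", ["read"]),
   ("write:graph", ["read:graph"]),
   ("write:connections", ["read"])]

-- Source B's module-level GRANTERS loop: GRANTERS.setdefault(s.value, set()).add(key.value)
-- is Dict.modify with default Set.empty and f = Set.add · key.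
def grantersDict : PySem.Dict String (PySem.Set String) :=
  hierarchyPairs.foldl
    (fun d kv => kv.2.foldl (fun d s => PySem.Dict.modify d s PySem.Set.empty (fun st => PySem.Set.add st kv.1)) d)
    PySem.Dict.empty

def has_scope_alt (granted_scopes : List String) (required_scope : String) : Bool :=
  let satisfiers : PySem.Set String :=
    PySem.Set.union (PySem.Set.ofList ["*", required_scope])
      (PySem.Dict.getD grantersDict required_scope PySem.Set.empty)
  granted_scopes.any (fun g => PySem.Set.contains satisfiers g)

-- ===== PRECONDITION & SPEC =====
def Spec_has_scope (granted_scopes : List String) (required_scope : String) (out : Bool) : Prop := out = has_scope_alt granted_scopes required_scope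
instance (granted_scopes : List String) (required_scope : String) (out : Bool) : Decidable (Spec_has_scope granted_scopes required_scope out) := by unfold Spec_has_scope; infer_instance

-- ===== CLAIM (what is proved, stated in full; the proofs are below) =====
def Claim_equal_has_scope : Prop := ∀ (granted_scopes : List String) (required_scope : String), Dom_has_scope granted_scopes required_scope → Spec_has_scope granted_scopes required_scope (has_scope granted_scopes required_scope)

-- ===== LEMMAS AND PROOFS =====

theorem loopA_eq_any (granted : List String) (r : String) :
    hasScopeLoopA granted r = granted.any (fun g => ((scopeImplied? g).getD []).contains r) := by
  induction granted with
  | nil => rfl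
  | cons g rest ih =>
    simp only [hasScopeLoopA, List.any_cons, ih]
    cases h : scopeImplied? g with
    | none => rfl
    | some l =>
      cases hc : l.contains r
      · simp
      · simp

-- the reverse index agrees with the forward hierarchy: g grants r iff r is implied by g
theorem granters_eq (r g : String) :
    PySem.Set.contains (PySem.Dict.getD grantersDict r PySem.Set.empty) g
      = ((scopeImplied? g).getD []).contains r := by
  have hG : grantersDict = ⟨[("read", ["admin", "internal", "write", "write:connections"]),
            ("read:graph", ["admin", "internal", "write:graph"]),
            ("read:analytics", ["admin", "internal"]),
            ("write", ["admin", "internal"]),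
            ("write:graph", ["admin", "internal"]),
            ("write:connections", ["admin", "internal"]),
            ("manage:keys", ["admin", "internal"]),
            ("mcp", ["admin", "internal"]),
            ("admin", ["internal"])]⟩ := by rfl
  rw [hG]
  by_cases h0 : r = "read"
  · subst h0; simp only [PySem.Dict.getD, PySem.Dict.get?, List.find?, PySem.Set.contains, scopeImplied?]
    norm_num; split_ifs <;> simp_all
  by_cases h1 : r = "read:graph"
  · subst h1; simp only [PySem.Dict.getD, PySem.Dict.get?, List.find?, PySem.Set.contains, scopeImplied?]
    norm_num; split_ifs <;> simp_all
  by_cases h2 : r = "read:analytics"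
  · subst h2; simp only [PySem.Dict.getD, PySem.Dict.get?, List.find?, PySem.Set.contains, scopeImplied?]
    norm_num; split_ifs <;> simp_all
  by_cases h3 : r = "write"
  · subst h3; simp only [PySem.Dict.getD, PySem.Dict.get?, List.find?, PySem.Set.contains, scopeImplied?]
    norm_num; split_ifs <;> simp_all
  by_cases h4 : r = "write:graph"
  · subst h4; simp only [PySem.Dict.getD, PySem.Dict.get?, List.find?, PySem.Set.contains, scopeImplied?]
    norm_num; split_ifs <;> simp_all
  by_cases h5 : r = "write:connections"
  · subst h5; simp only [PySem.Dict.getD, PySem.Dict.get?, List.find?, PySem.Set.contains, scopeImplied?]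
    norm_num; split_ifs <;> simp_all
  by_cases h6 : r = "manage:keys"
  · subst h6; simp only [PySem.Dict.getD, PySem.Dict.get?, List.find?, PySem.Set.contains, scopeImplied?]
    norm_num; split_ifs <;> simp_all
  by_cases h7 : r = "mcp"
  · subst h7; simp only [PySem.Dict.getD, PySem.Dict.get?, List.find?, PySem.Set.contains, scopeImplied?]
    norm_num; split_ifs <;> simp_all
  by_cases h8 : r = "admin"
  · subst h8; simp only [PySem.Dict.getD, PySem.Dict.get?, List.find?, PySem.Set.contains, scopeImplied?]
    norm_num; split_ifs <;> simp_all
  · have e0 : ("read" == r) = false := by simp; exact fun h => h0 h.symm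
    have e1 : ("read:graph" == r) = false := by simp; exact fun h => h1 h.symm
    have e2 : ("read:analytics" == r) = false := by simp; exact fun h => h2 h.symm
    have e3 : ("write" == r) = false := by simp; exact fun h => h3 h.symm
    have e4 : ("write:graph" == r) = false := by simp; exact fun h => h4 h.symm
    have e5 : ("write:connections" == r) = false := by simp; exact fun h => h5 h.symm
    have e6 : ("manage:keys" == r) = false := by simp; exact fun h => h6 h.symm
    have e7 : ("mcp" == r) = false := by simp; exact fun h => h7 h.symm
    have e8 : ("admin" == r) = false := by simp; exact fun h => h8 h.symm
    simp only [PySem.Dict.getD, PySem.Dict.get?, List.find?, PySem.Set.contains, scopeImplied?,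
      e0, e1, e2, e3, e4, e5, e6, e7, e8]
    split_ifs <;> simp_all

-- ===== VERDICT (by name: the statement is the Claim_ definition above) =====
theorem has_scope_spec : Claim_equal_has_scope := by
  intro granted required _
  unfold Spec_has_scope has_scope has_scope_alt
  rw [loopA_eq_any]
  split_ifs with hw hd
  · rw [eq_comm, List.any_eq_true]
    rw [List.contains_eq_mem, decide_eq_true_iff] at hw
    exact ⟨"*", hw, by simp [PySem.Set.mem_union, PySem.Set.mem_ofList]⟩
  · rw [eq_comm, List.any_eq_true]
    rw [List.contains_eq_mem, decide_eq_true_iff] at hd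
    exact ⟨required, hd, by simp [PySem.Set.mem_union, PySem.Set.mem_ofList]⟩
  · rw [List.contains_eq_mem, decide_eq_true_iff] at hw hd
    rw [Bool.eq_iff_iff, List.any_eq_true, List.any_eq_true]
    constructor
    · rintro ⟨g, hg, hr⟩
      refine ⟨g, hg, ?_⟩
      rw [PySem.Set.contains_iff, PySem.Set.mem_union]
      right
      rw [← PySem.Set.contains_iff, granters_eq]
      exact hr
    · rintro ⟨g, hg, hs⟩
      rw [PySem.Set.contains_iff, PySem.Set.mem_union, PySem.Set.mem_ofList] at hs
      rcases hs with hlit | hrev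
      · simp only [List.mem_cons, List.not_mem_nil, or_false] at hlit
        rcases hlit with rfl | rfl
        · exact absurd hg hw
        · exact absurd hg hd
      · rw [← PySem.Set.contains_iff, granters_eq] at hrev
        exact ⟨g, hg, hrev⟩
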